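-- pv_equiv track=rewrite | github.com/silverchan08/R-E | examine_handcuff.py | isComposite1
-- ===== SOURCE A (Python) =====
-- def isComposite1(cromwell_bit): # 1자로 연결된 composite
--     n = len(cromwell_bit)
--     # 한 행을 기준으로 해당 행을 포함하여 위에만 봤을 때 외톨이인 점이 2개 => composite
--     for row_idx in range(n): # 행 선택
--         cnt = 0
--         for col_idx in range(n+1): # 열 돌면서 확인
--             # 해당 행을 포함하여 위에 혼자 있는 점 개수
--             Above = 0
--             for another_row_idx in range(row_idx):
--                 if (cromwell_bit[another_row_idx] >> col_idx) & 1: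
--                     Above += 1
--             if Above == 1:
--                 cnt += 1
--         if cnt == 2:
--             return True
--     return False
-- ===== SOURCE B (Python) =====
-- def isComposite1(cromwell_bit):
--     # Incremental column counts: O(n^2) instead of A's O(n^3) recomputation.
--     n = len(cromwell_bit)
--     counts = [0] * (n + 1)
--     for row in cromwell_bit:
--         if counts.count(1) == 2:
--             return True
--         counts = [c + ((row >> col) & 1) for col, c in enumerate(counts)]
--     return False
-- ===== Notes on version B (the rewrite author's own statement) =====
-- stated objective: faster
-- what changed: B maintains per-column bit counts incrementally row by row (updating and scanning the n+1 counters once per row) instead of recomputing, for every row and every column, the count of set bits in all rows above.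
import Mathlib
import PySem

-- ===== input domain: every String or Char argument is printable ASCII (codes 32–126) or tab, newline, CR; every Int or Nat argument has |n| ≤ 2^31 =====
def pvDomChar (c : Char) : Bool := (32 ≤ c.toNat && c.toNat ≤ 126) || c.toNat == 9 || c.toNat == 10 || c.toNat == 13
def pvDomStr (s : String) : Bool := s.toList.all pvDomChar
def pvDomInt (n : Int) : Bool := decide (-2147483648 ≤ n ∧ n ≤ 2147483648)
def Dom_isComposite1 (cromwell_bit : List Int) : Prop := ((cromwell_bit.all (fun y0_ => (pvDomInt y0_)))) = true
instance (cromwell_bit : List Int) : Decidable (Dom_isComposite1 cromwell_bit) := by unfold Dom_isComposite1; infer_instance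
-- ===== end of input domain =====

-- B maintains per-column bit counts incrementally row by row (O(n^2)) instead of
-- recomputing, for each row and column, the number of set bits above (O(n^3)).


-- ===== PORT A =====
-- (x >> c) & 1, Python-exact (arithmetic shift on negatives).
def pvBit (x : Int) (c : Nat) : Int := PySem.Int.band (x >>> c) 1

def isComposite1 (cromwell_bit : List Int) : Bool :=
  let n := cromwell_bit.length
  (List.range n).any (fun row_idx =>
    -- cnt = number of columns whose inner "Above" loop ends at 1; the two inner
    -- accumulator loops are the two nested for-loops of A, folded left to right
    ((List.range (n + 1)).foldl (fun cnt col_idx =>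
      if ((List.range row_idx).foldl (fun Above (another_row_idx : Nat) =>
            -- index another_row_idx < row_idx ≤ n is always in range, so getD's default is never used
            if pvBit ((PySem.List.pyGet? cromwell_bit (another_row_idx : Int)).getD 0) col_idx ≠ 0
            then Above + 1 else Above) (0 : Int)) = 1
      then cnt + 1 else cnt) (0 : Int)) == 2)

-- ===== PORT B =====
-- loop body of Source B: check the tally of columns with count 1, then fold the row in
def altGo (counts : List Int) : List Int → Bool
  | [] => false
  | row :: rest =>
    if PySem.List.count counts 1 == 2 then true
    else altGo ((PySem.List.enumerate counts).map
          -- enumerate indices start at 0, so .toNat is exact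
          (fun p => p.2 + pvBit row p.1.toNat)) rest

def isComposite1_alt (cromwell_bit : List Int) : Bool :=
  altGo (List.replicate (cromwell_bit.length + 1) 0) cromwell_bit

-- ===== PRECONDITION & SPEC =====
def Spec_isComposite1 (cromwell_bit : List Int) (out : Bool) : Prop := out = isComposite1_alt cromwell_bit
instance (cromwell_bit : List Int) (out : Bool) : Decidable (Spec_isComposite1 cromwell_bit out) := by unfold Spec_isComposite1; infer_instance

-- ===== CLAIM (what is proved, stated in full; the proofs are below) =====
def Claim_equal_isComposite1 : Prop := ∀ (cromwell_bit : List Int), Dom_isComposite1 cromwell_bit → Spec_isComposite1 cromwell_bit (isComposite1 cromwell_bit)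

-- ===== LEMMAS AND PROOFS =====

-- number of rows whose bit c is set
def colCnt (rows : List Int) (c : Nat) : Int := (rows.countP (fun x => pvBit x c == 1) : Nat)

-- number of columns in 0..n whose colCnt is 1
def onesCnt (n : Nat) (rows : List Int) : Nat := (List.range (n + 1)).countP (fun c => colCnt rows c == 1)

-- the column counts after processing `rows`
def countsOf (n : Nat) (rows : List Int) : List Int := (List.range (n + 1)).map (fun c => colCnt rows c)

theorem pvBit01 (x : Int) (c : Nat) : pvBit x c = 0 ∨ pvBit x c = 1 := by
  have h := PySem.Int.band_one (x >>> c)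
  have h1 := PySem.Int.mod_nonneg (x >>> c) (b := 2) (by omega)
  have h2 := PySem.Int.mod_lt (x >>> c) (b := 2) (by omega)
  unfold pvBit; omega

theorem foldl_if_count (p : Nat → Bool) (l : List Nat) (a : Int) :
    l.foldl (fun cnt c => if p c then cnt + 1 else cnt) a = a + (l.countP p : Nat) := by
  induction l generalizing a with
  | nil => simp
  | cons x xs ih =>
    simp only [List.foldl_cons, List.countP_cons, ih]
    by_cases h : p x
    · simp [h]; ring
    · simp [h]

theorem above_fold (xs : List Int) (c : Nat) (r : Nat) (hr : r ≤ xs.length) :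
    (List.range r).foldl (fun Above (i : Nat) =>
      if pvBit ((PySem.List.pyGet? xs (i : Int)).getD 0) c ≠ 0 then Above + 1 else Above) 0
      = colCnt (xs.take r) c := by
  induction r with
  | zero => simp [colCnt]
  | succ m ih =>
    have hm : m < xs.length := by omega
    rw [List.range_succ, List.foldl_append]
    rw [ih (by omega)]
    have hget : PySem.List.pyGet? xs (m : Int) = some xs[m] := by
      simp [hm]
    have htake : xs.take (m + 1) = xs.take m ++ [xs[m]] := by
      rw [List.take_add_one]; simp [hm]
    simp only [List.foldl_cons, List.foldl_nil, hget, Option.getD_some, htake, colCnt,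
      List.countP_append, List.countP_cons, List.countP_nil]
    rcases pvBit01 xs[m] c with h | h <;> simp [h]

theorem cnt_A (xs : List Int) (r : Nat) (hr : r ≤ xs.length) :
    (List.range (xs.length + 1)).foldl (fun cnt col_idx =>
      if ((List.range r).foldl (fun Above (i : Nat) =>
            if pvBit ((PySem.List.pyGet? xs (i : Int)).getD 0) col_idx ≠ 0
            then Above + 1 else Above) (0 : Int)) = 1
      then cnt + 1 else cnt) (0 : Int)
      = (onesCnt xs.length (xs.take r) : Nat) := by
  calc (List.range (xs.length + 1)).foldl _ (0 : Int)
      = (List.range (xs.length + 1)).foldl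
          (fun cnt col => if colCnt (xs.take r) col == 1 then cnt + 1 else cnt) (0 : Int) := by
        apply PySem.List.foldl_congr_mem
        intro cnt col _
        rw [above_fold xs col r hr]
        by_cases h : colCnt (xs.take r) col = 1 <;> simp [h]
    _ = 0 + ((List.range (xs.length + 1)).countP (fun c => colCnt (xs.take r) c == 1) : Nat) :=
        foldl_if_count _ _ 0
    _ = (onesCnt xs.length (xs.take r) : Nat) := by simp [onesCnt]

theorem A_spec (xs : List Int) :
    isComposite1 xs = (List.range xs.length).any (fun r => onesCnt xs.length (xs.take r) == 2) := by
  unfold isComposite1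
  apply PySem.List.any_congr_mem
  intro r hr
  have hr' : r ≤ xs.length := le_of_lt (List.mem_range.mp hr)
  rw [cnt_A xs r hr']
  by_cases h : onesCnt xs.length (xs.take r) = 2
  · simp [h]
  · have h' : (onesCnt xs.length (xs.take r) : Int) ≠ 2 := by exact_mod_cast h
    simp [h, h']

theorem countsOf_nil (n : Nat) : countsOf n [] = List.replicate (n + 1) 0 := by
  unfold countsOf colCnt
  simp

theorem count_countsOf (n : Nat) (rows : List Int) :
    PySem.List.count (countsOf n rows) 1 = onesCnt n rows := by
  rw [PySem.List.count_eq]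
  unfold countsOf onesCnt
  rw [List.count_eq_countP, List.countP_map]
  rfl

theorem countsOf_step (n : Nat) (rows : List Int) (row : Int) :
    (PySem.List.enumerate (countsOf n rows)).map (fun p => p.2 + pvBit row p.1.toNat)
      = countsOf n (rows ++ [row]) := by
  apply List.ext_getElem
  · simp [countsOf, PySem.List.length_enumerate]
  · intro k h1 h2
    have hk : k < n + 1 := by simpa [countsOf] using h2
    have hkl : k < (countsOf n rows).length := by simp [countsOf]; omega
    simp only [List.getElem_map, PySem.List.getElem_enumerate, countsOf, List.getElem_range]
    have : ((0 : Int) + (k : Nat)).toNat = k := by omega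
    rw [this]
    unfold colCnt
    simp only [List.countP_append, List.countP_cons, List.countP_nil]
    rcases pvBit01 row k with h | h <;> simp [h]

theorem altGo_spec (n : Nat) (rest : List Int) : ∀ pre : List Int,
    altGo (countsOf n pre) rest
      = (List.range rest.length).any (fun r => onesCnt n (pre ++ rest.take r) == 2) := by
  induction rest with
  | nil => intro pre; simp [altGo]
  | cons row rest ih =>
    intro pre
    rw [altGo, count_countsOf]
    have hlen : (row :: rest).length = rest.length + 1 := rfl
    rw [hlen, List.range_succ_eq_map, List.any_cons, List.any_map]
    have h0 : (pre ++ (row :: rest).take 0) = pre := by simp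
    by_cases h : onesCnt n pre = 2
    · simp [h]
    · have hbeq : (onesCnt n pre == 2) = false := by simp [h]
      simp only [h0, hbeq, Bool.false_or]
      rw [if_neg (by simp)]
      rw [countsOf_step, ih (pre ++ [row])]
      apply PySem.List.any_congr_mem
      intro r _
      simp [List.append_assoc]

theorem B_spec (xs : List Int) :
    isComposite1_alt xs = (List.range xs.length).any (fun r => onesCnt xs.length (xs.take r) == 2) := by
  unfold isComposite1_alt
  rw [← countsOf_nil, altGo_spec]
  simp

-- ===== VERDICT (by name: the statement is the Claim_ definition above) =====
theorem isComposite1_spec : Claim_equal_isComposite1 := by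
  intro xs _
  unfold Spec_isComposite1
  rw [A_spec, B_spec]
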